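-- pv_equiv track=rewrite | github.com/aroneh19/Forritun | Próf/Lokapróf/Javelin_throw/javelin_throw.py | update_results
-- ===== SOURCE A (Python) =====
-- def update_results(results: list[str]):
--     standings = {} # Empty dictionary
--
--     for player in results:
--         if player[0] not in standings: # Checks if the player is in the dictionary, if not adds them to the dictionary
--             standings[player[0]] = {"first_name": "", "last_name": "", "score": ""}
--             standings[player[0]]["first_name"] = player[0]
--             standings[player[0]]["last_name"] = player[1]
--             standings[player[0]]["score"] = player[2]
--         else: # If there is a player in the dictionary, then add the score
--             standings[player[0]]["score"] += f" {player[2]}"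
--     return standings
-- ===== SOURCE B (Python) =====
-- def update_results(results: list[str]):
--     # Two-pass: group rows by their first character, then render each group once.
--     groups = {}
--     for player in results:
--         groups.setdefault(player[0], []).append(player)
--     standings = {}
--     for key, rows in groups.items():
--         first = rows[0]
--         score = first[2]
--         for p in rows[1:]:
--             score = f"{score} {p[2]}"
--         standings[key] = {"first_name": first[0], "last_name": first[1], "score": score}
--     return standings
-- ===== Notes on version B (the rewrite author's own statement) =====
-- stated objective: alternative
-- what changed: A builds the standings in one pass, conditionally inserting a fresh record or appending to an existing score; B first groups the rows by their first character with setdefault and then renders each group once (first row gives the names and seed score, the rest are folded into the score).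
import Mathlib
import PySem

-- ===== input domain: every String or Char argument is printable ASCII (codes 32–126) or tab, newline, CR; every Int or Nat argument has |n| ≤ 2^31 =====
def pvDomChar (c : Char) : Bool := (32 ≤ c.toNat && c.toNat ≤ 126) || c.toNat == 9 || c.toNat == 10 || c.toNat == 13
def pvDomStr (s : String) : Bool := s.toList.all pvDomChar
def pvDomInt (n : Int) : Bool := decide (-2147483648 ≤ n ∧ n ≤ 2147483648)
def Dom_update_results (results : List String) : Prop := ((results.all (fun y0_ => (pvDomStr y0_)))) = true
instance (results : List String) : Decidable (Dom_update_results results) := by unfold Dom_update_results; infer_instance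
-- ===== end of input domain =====

-- B replaces A's one-pass conditional dict update by a two-pass decomposition (group rows by key, then render
-- each group once); objective: alternative decomposition, same cost.

-- s[i] as a 1-character string (Python indexing; out of range = IndexError, excluded by Pre_)
def pvCh (s : String) (i : Int) : String :=
  match PySem.Str.pyGet? s i with
  | some c => String.ofList [c]
  | none => ""

-- ===== PORT A =====
-- one loop step of A's 'for player in results'
def pvStepA (d : PySem.Dict String (PySem.Dict String String)) (player : String) :
    PySem.Dict String (PySem.Dict String String) :=
  let k := pvCh player 0
  if d.contains k then
    -- standings[player[0]]["score"] += f" {player[2]}"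
    d.modify k PySem.Dict.empty
      (fun inner => inner.insert "score" (inner.getD "score" "" ++ " " ++ pvCh player 2))
  else
    let d1 := d.insert k (PySem.Dict.mk [("first_name", ""), ("last_name", ""), ("score", "")])
    let d2 := d1.modify k PySem.Dict.empty (fun inner => inner.insert "first_name" (pvCh player 0))
    let d3 := d2.modify k PySem.Dict.empty (fun inner => inner.insert "last_name" (pvCh player 1))
    d3.modify k PySem.Dict.empty (fun inner => inner.insert "score" (pvCh player 2))

def update_results (results : List String) : List (String × List (String × String)) :=
  ((results.foldl pvStepA PySem.Dict.empty).items.map (fun p => (p.1, p.2.items)))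

-- ===== PORT B =====
-- groups.setdefault(player[0], []).append(player): in-place append if the key exists, else append a new entry
def pvStepB (g : PySem.Dict String (List String)) (player : String) : PySem.Dict String (List String) :=
  g.modify (pvCh player 0) [] (fun rows => rows ++ [player])

-- score = first[2] then 'score = f"{score} {p[2]}"' over rows[1:]
def pvScore (first : String) (rest : List String) : String :=
  rest.foldl (fun sc p => sc ++ " " ++ pvCh p 2) (pvCh first 2)

-- the record built for one group (first = rows[0], rest = rows[1:]; groups are never empty)
def pvRecord (rows : List String) : PySem.Dict String String :=
  match rows with
  | [] => PySem.Dict.empty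
  | first :: rest =>
      PySem.Dict.mk [("first_name", pvCh first 0), ("last_name", pvCh first 1),
                     ("score", pvScore first rest)]

def update_results_alt (results : List String) : List (String × List (String × String)) :=
  let groups := results.foldl pvStepB PySem.Dict.empty
  let standings := groups.items.foldl (fun st kr => st.insert kr.1 (pvRecord kr.2)) PySem.Dict.empty
  standings.items.map (fun p => (p.1, p.2.items))

-- ===== PRECONDITION & SPEC =====
-- Pre_ excludes exactly the inputs where Python A raises IndexError: any string shorter than 3 characters
-- (A reads player[0], player[1] and player[2]).
def Pre_update_results (results : List String) : Prop := ∀ s ∈ results, 3 ≤ s.toList.length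
instance (results : List String) : Decidable (Pre_update_results results) := by
  unfold Pre_update_results; infer_instance
def pvWitness_update_results : List String := ["abc", "axy", "bcd"]

def Spec_update_results (results : List String) (out : List (String × List (String × String))) : Prop := out = update_results_alt results
instance (results : List String) (out : List (String × List (String × String))) : Decidable (Spec_update_results results out) := by unfold Spec_update_results; infer_instance

-- ===== CLAIM (what is proved, stated in full; the proofs are below) =====
def Claim_equal_update_results : Prop := ∀ (results : List String), Dom_update_results results → Pre_update_results results → Spec_update_results results (update_results results)

-- ===== LEMMAS AND PROOFS =====

-- rendering a whole group dict: what B's second pass produces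
def pvRender (g : PySem.Dict String (List String)) : PySem.Dict String (PySem.Dict String String) :=
  PySem.Dict.mk (g.items.map (fun kr => (kr.1, pvRecord kr.2)))

theorem pvRender_fold (g : PySem.Dict String (List String)) (hnd : g.keys.Nodup) :
    g.items.foldl (fun st kr => st.insert kr.1 (pvRecord kr.2)) PySem.Dict.empty = pvRender g := by
  apply PySem.Dict.ext
  rw [PySem.Dict.items_foldl_insert_fresh g.items (fun kr => kr.1) (fun kr => pvRecord kr.2)
    PySem.Dict.empty (fun a _ => PySem.Dict.contains_empty a.1) hnd]
  rfl

theorem pvContains_render (g : PySem.Dict String (List String)) (k : String) :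
    (pvRender g).contains k = g.contains k := by
  simp only [pvRender, PySem.Dict.contains, List.any_map]
  rfl

theorem pvGet?_render (g : PySem.Dict String (List String)) (k : String) :
    (pvRender g).get? k = (g.get? k).map pvRecord := by
  simp only [pvRender, PySem.Dict.get?, List.find?_map, Option.map_map]
  have h : ((fun (p : String × PySem.Dict String String) => p.1 == k) ∘
      fun kr : String × List String => (kr.1, pvRecord kr.2)) = (fun p => p.1 == k) := rfl
  rw [h]
  rfl

theorem pvNotMem_keys (g : PySem.Dict String (List String)) (k : String)
    (h : g.contains k = false) : k ∉ g.keys := by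
  have hk := PySem.Dict.contains_eq_decide_mem_keys g k
  rw [h] at hk
  simpa using hk.symm

theorem pvRender_insert_contains (g : PySem.Dict String (List String)) (k : String)
    (v : List String) (hc : g.contains k = true) :
    (pvRender g).insert k (pvRecord v) = pvRender (g.insert k v) := by
  apply PySem.Dict.ext
  have hR : ∀ (h : PySem.Dict String (List String)),
      (pvRender h).items = h.items.map (fun kr => (kr.1, pvRecord kr.2)) := fun _ => rfl
  rw [PySem.Dict.items_insert_of_contains _ _ (by rw [pvContains_render]; exact hc),
      hR, hR, PySem.Dict.items_insert_of_contains _ _ hc, List.map_map, List.map_map]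
  apply List.map_congr_left
  intro q _
  by_cases hq : (q.1 == k) = true
  · simp [Function.comp, hq]
  · simp [Function.comp, hq]

theorem pvRender_insert_fresh (g : PySem.Dict String (List String)) (k : String)
    (v : List String) (hc : g.contains k = false) :
    (pvRender g).insert k (pvRecord v) = pvRender (g.insert k v) := by
  apply PySem.Dict.ext
  have hR : ∀ (h : PySem.Dict String (List String)),
      (pvRender h).items = h.items.map (fun kr => (kr.1, pvRecord kr.2)) := fun _ => rfl
  rw [PySem.Dict.items_insert_of_not_contains _ _ (by rw [pvContains_render]; exact hc),
      hR, hR, PySem.Dict.items_insert_of_not_contains _ _ hc]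
  simp

theorem pvRecord_append (rows : List String) (p : String) (h : rows ≠ []) :
    pvRecord (rows ++ [p]) =
      (pvRecord rows).insert "score" ((pvRecord rows).getD "score" "" ++ " " ++ pvCh p 2) := by
  match rows with
  | first :: rest =>
    simp [pvRecord, pvScore, PySem.Dict.insert, PySem.Dict.getD, PySem.Dict.get?,
      PySem.Dict.contains, List.foldl_append]

theorem pvModify_insert_fresh (d : PySem.Dict String (PySem.Dict String String)) (k : String)
    (v : PySem.Dict String String) (f : PySem.Dict String String → PySem.Dict String String) :
    (d.insert k v).modify k PySem.Dict.empty f = d.insert k (f v) := by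
  rw [PySem.Dict.modify, PySem.Dict.getD_insert_self, PySem.Dict.insert_insert_self]

theorem pvStep_eq (g : PySem.Dict String (List String)) (p : String)
    (hnd : g.keys.Nodup) (hne : ∀ kv ∈ g.items, kv.2 ≠ []) :
    pvStepA (pvRender g) p = pvRender (pvStepB g p) := by
  by_cases hc : g.contains (pvCh p 0) = true
  · -- key already present: A appends to the score, B appends the row to the group
    obtain ⟨rows, hrows⟩ : ∃ rows, g.get? (pvCh p 0) = some rows := by
      cases h : g.get? (pvCh p 0) with
      | none => rw [PySem.Dict.get?_eq_none_iff_contains] at h; rw [hc] at h; cases h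
      | some rows => exact ⟨rows, rfl⟩
    have hrne : rows ≠ [] := hne _ (PySem.Dict.mem_items_of_get?_eq_some g hrows)
    simp only [pvStepA, pvStepB, pvContains_render, hc, if_true]
    rw [PySem.Dict.modify, PySem.Dict.modify]
    have hgd : (pvRender g).getD (pvCh p 0) PySem.Dict.empty = pvRecord rows := by
      rw [PySem.Dict.getD, pvGet?_render, hrows]; rfl
    have hgd' : g.getD (pvCh p 0) [] = rows := by rw [PySem.Dict.getD, hrows]; rfl
    rw [hgd, hgd', ← pvRecord_append rows p hrne]
    exact pvRender_insert_contains g _ (rows ++ [p]) hc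
  · -- fresh key: both sides append a new entry
    rw [Bool.not_eq_true] at hc
    simp only [pvStepA, pvStepB, pvContains_render, hc, if_false, Bool.false_eq_true]
    rw [pvModify_insert_fresh, pvModify_insert_fresh, pvModify_insert_fresh, PySem.Dict.modify]
    have hnone : g.get? (pvCh p 0) = none := (PySem.Dict.get?_eq_none_iff_contains g _).mpr hc
    rw [PySem.Dict.getD, hnone]
    show (pvRender g).insert (pvCh p 0) (pvRecord ([] ++ [p])) =
      pvRender (g.insert (pvCh p 0) ([] ++ [p]))
    exact pvRender_insert_fresh g _ ([] ++ [p]) hc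

theorem pvStepB_nodup (g : PySem.Dict String (List String)) (p : String) (hnd : g.keys.Nodup) :
    (pvStepB g p).keys.Nodup := by
  unfold pvStepB
  rw [PySem.Dict.keys_modify]
  by_cases hc : g.contains (pvCh p 0) = true
  · rw [PySem.Dict.keys_insert_of_contains _ _ hc]; exact hnd
  · rw [Bool.not_eq_true] at hc
    rw [PySem.Dict.keys_insert_of_not_contains _ _ hc]
    simp only [List.nodup_append, List.nodup_singleton, true_and]
    refine ⟨hnd, ?_⟩
    intro a ha b hb
    rw [List.mem_singleton] at hb
    intro hab
    exact pvNotMem_keys g _ hc ((hb ▸ hab) ▸ ha)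

theorem pvStepB_ne_nil (g : PySem.Dict String (List String)) (p : String)
    (hne : ∀ kv ∈ g.items, kv.2 ≠ []) : ∀ kv ∈ (pvStepB g p).items, kv.2 ≠ [] := by
  unfold pvStepB
  rw [PySem.Dict.modify]
  by_cases hc : g.contains (pvCh p 0) = true
  · rw [PySem.Dict.items_insert_of_contains _ _ hc]
    intro kv hkv
    obtain ⟨q, hq, heq⟩ := List.mem_map.mp hkv
    by_cases hqk : (q.1 == pvCh p 0) = true
    · rw [if_pos hqk] at heq; simp [← heq]
    · rw [if_neg hqk] at heq; exact heq ▸ hne q hq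
  · rw [Bool.not_eq_true] at hc
    rw [PySem.Dict.items_insert_of_not_contains _ _ hc]
    intro kv hkv
    rcases List.mem_append.mp hkv with h | h
    · exact hne kv h
    · simp only [List.mem_singleton] at h; simp [h]

theorem pvMain (l : List String) (g : PySem.Dict String (List String))
    (hnd : g.keys.Nodup) (hne : ∀ kv ∈ g.items, kv.2 ≠ []) :
    l.foldl pvStepA (pvRender g) = pvRender (l.foldl pvStepB g) := by
  induction l generalizing g with
  | nil => rfl
  | cons p l ih =>
      simp only [List.foldl_cons, pvStep_eq g p hnd hne]
      exact ih _ (pvStepB_nodup g p hnd) (pvStepB_ne_nil g p hne)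

theorem pvGroups_nodup (l : List String) :
    (l.foldl pvStepB PySem.Dict.empty).keys.Nodup := by
  unfold pvStepB
  exact PySem.Dict.nodup_keys_foldl_modify_key l (fun p => pvCh p 0) []
    (fun _ p rows => rows ++ [p]) PySem.Dict.empty PySem.Dict.nodup_keys_empty

-- ===== VERDICT (by name: the statement is the Claim_ definition above) =====
theorem update_results_spec : Claim_equal_update_results := by
  intro results _ _
  unfold Spec_update_results update_results update_results_alt
  show List.map (fun p => (p.1, p.2.items)) (results.foldl pvStepA PySem.Dict.empty).items =
    List.map (fun p => (p.1, p.2.items))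
      ((results.foldl pvStepB PySem.Dict.empty).items.foldl
        (fun st kr => st.insert kr.1 (pvRecord kr.2)) PySem.Dict.empty).items
  rw [pvRender_fold _ (pvGroups_nodup results)]
  have h0 : (PySem.Dict.empty : PySem.Dict String (PySem.Dict String String)) =
      pvRender PySem.Dict.empty := rfl
  rw [h0, pvMain results PySem.Dict.empty PySem.Dict.nodup_keys_empty (fun _ h => nomatch h)]
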